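-- pv_equiv track=rewrite | github.com/Kommissaren/portfolio | decryption/decryption.py | expand_charset
-- ===== SOURCE A (Python) =====
-- def expand_charset(spec: str):
--     """Simple helper to expand a charset spec like a-zA-Z0-9!@#"""
--     out = []
--     i = 0
--     while i < len(spec):
--         if i+2 < len(spec) and spec[i+1] == '-':
--             for c in range(ord(spec[i]), ord(spec[i+2]) + 1):
--                 out.append(chr(c))
--             i += 3
--         else:
--             out.append(spec[i])
--             i += 1
--     return ''.join(out)
-- ===== SOURCE B (Python) =====
-- def expand_charset(spec: str):
--     """Expand a charset spec like a-zA-Z0-9!@# via a single-pass state machine."""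
--     out = []
--     start = None   # pending character (possible range start)
--     dash = False   # a '-' was seen right after `start`
--     for ch in spec:
--         if dash:
--             out.extend(chr(c) for c in range(ord(start), ord(ch) + 1))
--             start, dash = None, False
--         elif start is not None and ch == '-':
--             dash = True
--         else:
--             if start is not None:
--                 out.append(start)
--             start = ch
--     if start is not None:
--         out.append(start)
--         if dash:
--             out.append('-')
--     return ''.join(out)
-- ===== Notes on version B (the rewrite author's own statement) =====
-- stated objective: faster
-- what changed: Replaced the index/lookahead while-loop with a single left-to-right fold over the characters driven by a two-field state machine (pending range-start char + dash flag), removing all indexing and lookahead.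
import Mathlib
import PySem

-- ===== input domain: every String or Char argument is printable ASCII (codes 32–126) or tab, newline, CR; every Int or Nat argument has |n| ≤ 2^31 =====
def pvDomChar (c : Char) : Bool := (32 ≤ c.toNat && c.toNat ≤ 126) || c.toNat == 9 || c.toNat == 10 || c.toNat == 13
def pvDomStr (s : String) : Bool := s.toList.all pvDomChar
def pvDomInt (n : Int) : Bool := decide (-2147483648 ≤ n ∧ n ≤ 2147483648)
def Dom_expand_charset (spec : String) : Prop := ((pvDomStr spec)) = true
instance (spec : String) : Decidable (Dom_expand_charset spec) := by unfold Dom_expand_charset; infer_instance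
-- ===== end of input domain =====

-- B replaces A's index/lookahead while-loop by a single character fold with a
-- two-field state machine (pending range-start + dash flag); no per-character indexing (timed faster by the check).

-- chr(c) for c in range(ord a, ord c + 1)   (used by both Pythons for a range a-c)
def rangeChars (a c : Char) : List Char :=
  (List.range' a.toNat (c.toNat + 1 - a.toNat)).map (fun n => Char.ofNat n)

-- ===== PORT A =====
-- A's while-loop over index i, as recursion on the remaining characters:
-- 'i+2 < len(spec) and spec[i+1] == "-"' = at least three chars remain and the second is '-'.
def expandA : List Char → List Char
  | a :: b :: c :: rest =>
      if b = '-' then rangeChars a c ++ expandA rest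
      else a :: expandA (b :: c :: rest)
  | a :: rest => a :: expandA rest
  | [] => []

def expand_charset (spec : String) : String := String.mk (expandA spec.toList)

-- ===== PORT B =====
-- B's loop body: state = (out, start, dash)
def stepB (st : List Char × Option Char × Bool) (ch : Char) : List Char × Option Char × Bool :=
  match st with
  | (out, some a, true) => (out ++ rangeChars a ch, none, false)
  | (out, some a, false) =>
      if ch = '-' then (out, some a, true) else (out ++ [a], some ch, false)
  | (out, none, _) => (out, some ch, false)

-- B's post-loop flush of the pending state
def finishB : List Char × Option Char × Bool → List Char
  | (out, some a, dash) => out ++ [a] ++ (if dash then ['-'] else [])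
  | (out, none, _) => out

def expand_charset_alt (spec : String) : String :=
  String.mk (finishB (spec.toList.foldl stepB ([], none, false)))

-- ===== PRECONDITION & SPEC =====
def Spec_expand_charset (spec : String) (out : String) : Prop := out = expand_charset_alt spec
instance (spec : String) (out : String) : Decidable (Spec_expand_charset spec out) := by unfold Spec_expand_charset; infer_instance

-- ===== CLAIM (what is proved, stated in full; the proofs are below) =====
def Claim_equal_expand_charset : Prop := ∀ (spec : String), Dom_expand_charset spec → Spec_expand_charset spec (expand_charset spec)

-- ===== LEMMAS AND PROOFS =====

theorem expandA_cons_ne (a b : Char) (l : List Char) (hb : b ≠ '-') :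
    expandA (a :: b :: l) = a :: expandA (b :: l) := by
  cases l <;> simp [expandA, hb]

-- main invariant: running B's fold with a pending char a (no dash) computes A's result on a :: l
theorem L1 : ∀ (n : ℕ) (l : List Char), l.length ≤ n → ∀ (out : List Char) (a : Char),
    finishB (l.foldl stepB (out, some a, false)) = out ++ expandA (a :: l) := by
  intro n
  induction n with
  | zero =>
    intro l hl out a
    cases l with
    | nil => simp [finishB, expandA]
    | cons b t => simp at hl
  | succ n ih =>
    intro l hl out a
    cases l with
    | nil => simp [finishB, expandA]
    | cons b rest =>
      by_cases hb : b = '-'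
      · subst hb
        cases rest with
        | nil => simp [stepB, finishB, expandA]
        | cons c rest' =>
          have h1 : (('-' :: c :: rest').foldl stepB (out, some a, false))
              = rest'.foldl stepB (out ++ rangeChars a c, none, false) := by
            simp [List.foldl, stepB]
          rw [h1]
          have h2 : expandA (a :: '-' :: c :: rest') = rangeChars a c ++ expandA rest' := by
            simp [expandA]
          rw [h2]
          cases rest' with
          | nil => simp [finishB, expandA]
          | cons d rest'' =>
            have h3 : ((d :: rest'').foldl stepB (out ++ rangeChars a c, none, false))
                = rest''.foldl stepB (out ++ rangeChars a c, some d, false) := by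
              simp [List.foldl, stepB]
            rw [h3, ih rest'' (by simp at hl; omega) (out ++ rangeChars a c) d]
            simp
      · have h1 : ((b :: rest).foldl stepB (out, some a, false))
            = rest.foldl stepB (out ++ [a], some b, false) := by
          simp [List.foldl, stepB, hb]
        rw [h1, ih rest (by simp at hl; omega) (out ++ [a]) b,
            expandA_cons_ne a b rest hb]
        simp

theorem finishB_foldl (l : List Char) :
    finishB (l.foldl stepB ([], none, false)) = expandA l := by
  cases l with
  | nil => simp [finishB, expandA]
  | cons a rest =>
    have h : ((a :: rest).foldl stepB ([], none, false))
        = rest.foldl stepB ([], some a, false) := by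
      simp [List.foldl, stepB]
    rw [h, L1 rest.length rest le_rfl [] a]
    simp

-- ===== VERDICT (by name: the statement is the Claim_ definition above) =====
theorem expand_charset_spec : Claim_equal_expand_charset := by
  intro spec _
  unfold Spec_expand_charset expand_charset expand_charset_alt
  rw [finishB_foldl]
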